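-- pv_equiv track=rewrite | github.com/ShuHengLin/oxford-visualization | lib/utils_data_loading.py | match_to_radar
-- ===== SOURCE A (Python) =====
-- def match_to_radar(radar_timestamp, src_timestamp):
--   dst_timestamps = []
--   src_timestamp_i = 0
--   for radar_timestamp_i in range(len(radar_timestamp)):
--     while src_timestamp[src_timestamp_i] <= radar_timestamp[radar_timestamp_i]:
--       src_timestamp_i += 1
--     if (src_timestamp[src_timestamp_i] - radar_timestamp[radar_timestamp_i]) > (radar_timestamp[radar_timestamp_i] - src_timestamp[src_timestamp_i - 1]):
--       dst_timestamps.append(int(src_timestamp[src_timestamp_i - 1]))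
--     elif (src_timestamp[src_timestamp_i] - radar_timestamp[radar_timestamp_i]) <= (radar_timestamp[radar_timestamp_i] - src_timestamp[src_timestamp_i - 1]):
--       dst_timestamps.append(int(src_timestamp[src_timestamp_i]))
--   return dst_timestamps
-- ===== SOURCE B (Python) =====
-- def match_to_radar(radar_timestamp, src_timestamp):
--   dst_timestamps = []
--   k = 0
--   for j in range(len(src_timestamp)):
--     s = src_timestamp[j]
--     while k < len(radar_timestamp) and s > radar_timestamp[k]:
--       r = radar_timestamp[k]
--       if (s - r) > (r - src_timestamp[j - 1]):
--         dst_timestamps.append(int(src_timestamp[j - 1]))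
--       else:
--         dst_timestamps.append(int(s))
--       k += 1
--   return dst_timestamps
-- ===== Notes on version B (the rewrite author's own statement) =====
-- stated objective: alternative
-- what changed: Inverts the loop structure into a single merge pass: B iterates over src with an inner cursor k over radar (emitting every radar timestamp smaller than the current src element), replacing A's outer loop over radar with a stateful never-reset scan pointer into src; the comparison body (including the src[j-1] negative-index case and the tie rule) is kept intact.
import Mathlib
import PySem

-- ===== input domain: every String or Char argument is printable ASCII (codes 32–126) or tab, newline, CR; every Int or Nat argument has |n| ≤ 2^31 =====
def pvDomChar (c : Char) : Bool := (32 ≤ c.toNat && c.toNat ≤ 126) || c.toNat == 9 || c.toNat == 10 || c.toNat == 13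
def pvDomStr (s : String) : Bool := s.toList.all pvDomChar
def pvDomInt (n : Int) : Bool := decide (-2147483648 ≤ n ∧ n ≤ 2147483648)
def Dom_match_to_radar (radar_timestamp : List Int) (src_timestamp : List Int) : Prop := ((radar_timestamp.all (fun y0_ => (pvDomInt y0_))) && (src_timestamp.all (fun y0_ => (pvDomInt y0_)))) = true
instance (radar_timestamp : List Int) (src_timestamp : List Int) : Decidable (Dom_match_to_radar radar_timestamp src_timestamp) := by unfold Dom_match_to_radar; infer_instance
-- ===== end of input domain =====

-- B inverts A's loops into a single merge pass: outer loop over src with an inner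
-- radar cursor, replacing A's stateful never-reset src pointer; objective: alternative.


-- ===== PORT A =====
-- A's inner `while src[i] <= r: i += 1`; where Python would raise IndexError
-- (i = len(src)) this returns i unchanged — exactly those inputs are outside Pre_.
def advancePtr (src : List Int) (r : Int) (i : Nat) : Nat :=
  if _h : i < src.length then
    if src.getD i 0 ≤ r then advancePtr src r (i + 1) else i
  else i
termination_by src.length - i

def match_to_radar (radar_timestamp : List Int) (src_timestamp : List Int) : List Int :=
  (radar_timestamp.foldl
    (fun (st : Nat × List Int) r =>
      let i := advancePtr src_timestamp r st.1
      let sHi := src_timestamp.getD i 0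
      let sLo := (PySem.List.pyGet? src_timestamp ((i : Int) - 1)).getD 0
      if sHi - r > r - sLo then (i, st.2 ++ [sLo]) else (i, st.2 ++ [sHi]))
    (0, [])).2

-- ===== PORT B =====
-- Source B's inner `while k < len(radar) and s > radar[k]` loop; the guard keeps k in
-- range, so getD is exact; (j - 1) goes through pyGet? for Python's negative index.
def emitAll (radar src : List Int) (j s : Int) (k : Nat) (acc : List Int) : Nat × List Int :=
  if _h : k < radar.length then
    if s > radar.getD k 0 then
      let r := radar.getD k 0
      let sLo := (PySem.List.pyGet? src (j - 1)).getD 0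
      emitAll radar src j s (k + 1) (acc ++ [if s - r > r - sLo then sLo else s])
    else (k, acc)
  else (k, acc)
termination_by radar.length - k

def match_to_radar_alt (radar_timestamp : List Int) (src_timestamp : List Int) : List Int :=
  ((PySem.List.pyRange 0 src_timestamp.length 1).foldl
    (fun (st : Nat × List Int) j =>
      let s := PySem.List.pyGetD src_timestamp j 0
      emitAll radar_timestamp src_timestamp j s st.1 st.2)
    (0, [])).2

-- ===== PRECONDITION & SPEC =====
-- Exactly the inputs on which A returns normally: A raises IndexError iff some radar
-- timestamp has no strictly greater src timestamp (the scan then runs off the end).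
def Pre_match_to_radar (radar_timestamp : List Int) (src_timestamp : List Int) : Prop :=
  ∀ r ∈ radar_timestamp, ∃ s ∈ src_timestamp, r < s
instance (radar_timestamp : List Int) (src_timestamp : List Int) : Decidable (Pre_match_to_radar radar_timestamp src_timestamp) := by unfold Pre_match_to_radar; infer_instance

def pvWitness_match_to_radar : List Int × List Int := ([1, 5], [0, 8, 3])

def Spec_match_to_radar (radar_timestamp : List Int) (src_timestamp : List Int) (out : List Int) : Prop := out = match_to_radar_alt radar_timestamp src_timestamp
instance (radar_timestamp : List Int) (src_timestamp : List Int) (out : List Int) : Decidable (Spec_match_to_radar radar_timestamp src_timestamp out) := by unfold Spec_match_to_radar; infer_instance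

-- ===== CLAIM (what is proved, stated in full; the proofs are below) =====
def Claim_equal_match_to_radar : Prop := ∀ (radar_timestamp : List Int) (src_timestamp : List Int), Dom_match_to_radar radar_timestamp src_timestamp → Pre_match_to_radar radar_timestamp src_timestamp → Spec_match_to_radar radar_timestamp src_timestamp (match_to_radar radar_timestamp src_timestamp)

-- ===== LEMMAS AND PROOFS =====

-- the value both programs append for radar value r answered at src position j
def valAt (src : List Int) (j : Nat) (r : Int) : Int :=
  let sHi := src.getD j 0
  let sLo := (PySem.List.pyGet? src ((j : Int) - 1)).getD 0
  if sHi - r > r - sLo then sLo else sHi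

-- common reference: the merge of both programs, j = src position, rr = remaining radar
def mergeRef (src : List Int) : Nat → List Int → List Int → List Int
  | _, [], acc => acc
  | j, r :: rest, acc =>
    if _h : j < src.length then
      if src.getD j 0 > r then mergeRef src j rest (acc ++ [valAt src j r])
      else mergeRef src (j + 1) (r :: rest) acc
    else acc
termination_by j rr _ => (src.length - j) + rr.length
decreasing_by all_goals (simp only [List.length_cons]; omega)

theorem advance_le (src : List Int) (r : Int) (M : Nat) (hM : M < src.length)
    (hrM : r < src.getD M 0) : ∀ j : Nat, j ≤ M → advancePtr src r j ≤ M := by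
  intro j hj
  have hjlen : j < src.length := lt_of_le_of_lt hj hM
  rw [advancePtr, dif_pos hjlen]
  by_cases hc : src.getD j 0 ≤ r
  · rw [if_pos hc]
    have hjM : j < M := by
      rcases Nat.eq_or_lt_of_le hj with rfl | h
      · omega
      · exact h
    exact advance_le src r M hM hrM (j + 1) hjM
  · rw [if_neg hc]; exact hj
termination_by j => M - j

theorem mergeRef_step (src : List Int) (r : Int) (M : Nat) (hM : M < src.length)
    (hrM : r < src.getD M 0) :
    ∀ (j : Nat), j ≤ M → ∀ (rest acc : List Int),
      mergeRef src j (r :: rest) acc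
        = mergeRef src (advancePtr src r j) rest
            (acc ++ [valAt src (advancePtr src r j) r]) := by
  intro j hj rest acc
  have hjlen : j < src.length := lt_of_le_of_lt hj hM
  rw [advancePtr, dif_pos hjlen]
  by_cases hc : src.getD j 0 ≤ r
  · rw [if_pos hc]
    have hjM : j < M := by
      rcases Nat.eq_or_lt_of_le hj with rfl | h
      · omega
      · exact h
    rw [mergeRef, dif_pos hjlen, if_neg (not_lt.mpr hc)]
    exact mergeRef_step src r M hM hrM (j + 1) hjM rest acc
  · rw [if_neg hc, mergeRef, dif_pos hjlen, if_pos (not_le.mp hc)]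
termination_by j => M - j

theorem A_eq_merge (src : List Int) (M : Nat) (hM : M < src.length) :
    ∀ (rr : List Int) (j : Nat) (acc : List Int), j ≤ M →
      (∀ r ∈ rr, r < src.getD M 0) →
      (rr.foldl
        (fun (st : Nat × List Int) r =>
          let i := advancePtr src r st.1
          let sHi := src.getD i 0
          let sLo := (PySem.List.pyGet? src ((i : Int) - 1)).getD 0
          if sHi - r > r - sLo then (i, st.2 ++ [sLo]) else (i, st.2 ++ [sHi]))
        (j, acc)).2 = mergeRef src j rr acc := by
  intro rr
  induction rr with
  | nil => intro j acc _ _; rw [List.foldl_nil, mergeRef]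
  | cons r rest ih =>
    intro j acc hj hlt
    have hrM := hlt r (List.mem_cons_self ..)
    have hadvle := advance_le src r M hM hrM j hj
    rw [mergeRef_step src r M hM hrM j hj rest acc]
    have hpair :
        (let i := advancePtr src r (j, acc).1
         let sHi := src.getD i 0
         let sLo := (PySem.List.pyGet? src ((i : Int) - 1)).getD 0
         if sHi - r > r - sLo then (i, (j, acc).2 ++ [sLo]) else (i, (j, acc).2 ++ [sHi]))
        = (advancePtr src r j, acc ++ [valAt src (advancePtr src r j) r]) := by
      simp only [valAt]
      split <;> rfl
    rw [List.foldl_cons, hpair]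
    exact ih (advancePtr src r j) _ hadvle (fun r' h => hlt r' (List.mem_cons_of_mem _ h))

theorem drop_eq_getD_cons (l : List Int) (k : Nat) (hk : k < l.length) :
    l.drop k = l.getD k 0 :: l.drop (k + 1) := by
  rw [List.getD_eq_getElem l 0 hk]
  exact List.drop_eq_getElem_cons hk

theorem emit_merge (radar src : List Int) (j : Nat) (hj : j < src.length) :
    ∀ (k : Nat) (acc : List Int),
      mergeRef src j (radar.drop k) acc
        = mergeRef src (j + 1)
            (radar.drop (emitAll radar src (j : Int) (src.getD j 0) k acc).1)
            (emitAll radar src (j : Int) (src.getD j 0) k acc).2 := by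
  intro k acc
  rw [emitAll]
  by_cases hk : k < radar.length
  · rw [dif_pos hk, drop_eq_getD_cons radar k hk]
    by_cases hs : src.getD j 0 > radar.getD k 0
    · rw [if_pos hs, mergeRef, dif_pos hj, if_pos hs]
      have hval : valAt src j (radar.getD k 0)
          = (if src.getD j 0 - radar.getD k 0 >
                radar.getD k 0 - (PySem.List.pyGet? src ((j : Int) - 1)).getD 0
             then (PySem.List.pyGet? src ((j : Int) - 1)).getD 0 else src.getD j 0) := by
        rw [valAt]
      rw [hval]
      exact emit_merge radar src j hj (k + 1) _
    · rw [if_neg hs, mergeRef, dif_pos hj, if_neg hs,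
        ← drop_eq_getD_cons radar k hk]
  · rw [dif_neg hk]
    have hdrop : radar.drop k = [] := List.drop_eq_nil_of_le (Nat.le_of_not_lt hk)
    rw [hdrop, mergeRef, mergeRef]
termination_by k _ => radar.length - k

theorem B_eq_merge (radar src : List Int) :
    ∀ (j : Nat) (k : Nat) (acc : List Int), j ≤ src.length →
      ((PySem.List.pyRange (j : Int) (src.length : Int) 1).foldl
        (fun (st : Nat × List Int) jj =>
          let s := PySem.List.pyGetD src jj 0
          emitAll radar src jj s st.1 st.2)
        (k, acc)).2 = mergeRef src j (radar.drop k) acc := by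
  intro j k acc hj
  rcases Nat.eq_or_lt_of_le hj with rfl | hlt
  · rw [PySem.List.pyRange_one_eq_nil (le_refl _), List.foldl_nil]
    cases hd : radar.drop k with
    | nil => rw [mergeRef]
    | cons r rest => rw [mergeRef]; simp
  · rw [PySem.List.pyRange_one_cons (by exact_mod_cast hlt), List.foldl_cons]
    have hone : ((j : Int) + 1) = ((j + 1 : Nat) : Int) := by push_cast; ring
    rcases he : emitAll radar src (j : Int) (PySem.List.pyGetD src (j : Int) 0) k acc
      with ⟨k', acc'⟩
    have hgd : PySem.List.pyGetD src (j : Int) 0 = src.getD j 0 :=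
      PySem.List.pyGetD_natCast ..
    rw [hgd] at he
    have hstep := emit_merge radar src j hlt k acc
    rw [he] at hstep
    simp only [hone, hstep]
    exact B_eq_merge radar src (j + 1) k' acc' hlt
termination_by j _ _ => src.length - j

theorem list_max_exists (l : List Int) (h : l ≠ []) : ∃ m ∈ l, ∀ x ∈ l, x ≤ m := by
  induction l with
  | nil => exact absurd rfl h
  | cons a t ih =>
    rcases eq_or_ne t [] with rfl | ht
    · exact ⟨a, by simp, by simp⟩
    · obtain ⟨m, hm, hmax⟩ := ih ht
      rcases le_total a m with hc | hc
      · refine ⟨m, List.mem_cons_of_mem _ hm, ?_⟩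
        intro x hx
        rcases List.mem_cons.mp hx with rfl | hx
        · exact hc
        · exact hmax x hx
      · refine ⟨a, List.mem_cons_self .., ?_⟩
        intro x hx
        rcases List.mem_cons.mp hx with rfl | hx
        · exact le_refl _
        · exact le_trans (hmax x hx) hc

-- ===== VERDICT (by name: the statement is the Claim_ definition above) =====
theorem match_to_radar_spec : Claim_equal_match_to_radar := by
  intro radar src _hdom hpre
  unfold Spec_match_to_radar match_to_radar match_to_radar_alt
  have hB := B_eq_merge radar src 0 0 [] (Nat.zero_le _)
  simp only [Nat.cast_zero, List.drop_zero] at hB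
  rw [hB]
  cases radar with
  | nil => rw [List.foldl_nil, mergeRef]
  | cons r0 rrest =>
    obtain ⟨s0, hs0mem, _⟩ := hpre r0 (List.mem_cons_self ..)
    have hsrcne : src ≠ [] := fun hnil => by simp [hnil] at hs0mem
    obtain ⟨m, hmmem, hmax⟩ := list_max_exists src hsrcne
    obtain ⟨M, hMlt, hMeq⟩ := List.mem_iff_getElem.mp hmmem
    have hMget : src.getD M 0 = m := by rw [List.getD_eq_getElem src 0 hMlt, hMeq]
    have hall : ∀ r ∈ r0 :: rrest, r < src.getD M 0 := by
      intro r hr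
      obtain ⟨s, hsmem, hrs⟩ := hpre r hr
      have := hmax s hsmem
      rw [hMget]
      omega
    exact A_eq_merge src M hMlt (r0 :: rrest) 0 [] (Nat.zero_le _) hall
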